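-- pv_equiv track=rewrite | github.com/pypi-data/pypi-mirror-379 | packages/dsFramework/dsframework-0.4.5.tar.gz/dsframework-0.4.5/dsframework/base/common/regex_handler.py | get_number_of_digits_and_digits_groups_in_text
-- ===== SOURCE A (Python) =====
-- def get_number_of_digits_and_digits_groups_in_text(t):
--     """
--     get all numbers and their number of digits in text
--     @param t:
--     @return: list of numbers and their digit amount
--     """
--     groups = []
--     n_digits = 0
--     group = ''
--     for c in t:
--         if c.isdigit():
--             n_digits += 1
--             group += c
--         else:
--             if len(group):
--                 groups.append(group)
--                 group = ''
--     if len(group):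
--         groups.append(group)
--     return n_digits, groups
-- ===== SOURCE B (Python) =====
-- def get_number_of_digits_and_digits_groups_in_text(t):
--     """
--     get all numbers and their number of digits in text
--     @param t:
--     @return: list of numbers and their digit amount
--     """
--     groups = []
--     i = 0
--     n = len(t)
--     while i < n:
--         if t[i].isdigit():
--             j = i + 1
--             while j < n and t[j].isdigit():
--                 j += 1
--             groups.append(t[i:j])
--             i = j
--         else:
--             i += 1
--     return sum(len(g) for g in groups), groups
-- ===== Notes on version B (the rewrite author's own statement) =====
-- stated objective: alternative
-- what changed: Replaces A's char-by-char accumulator loop (building each group by string concatenation and counting digits as it goes) with a two-pointer run scanner that slices out each maximal digit run at once and derives the digit count as the sum of group lengths.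
import Mathlib
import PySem

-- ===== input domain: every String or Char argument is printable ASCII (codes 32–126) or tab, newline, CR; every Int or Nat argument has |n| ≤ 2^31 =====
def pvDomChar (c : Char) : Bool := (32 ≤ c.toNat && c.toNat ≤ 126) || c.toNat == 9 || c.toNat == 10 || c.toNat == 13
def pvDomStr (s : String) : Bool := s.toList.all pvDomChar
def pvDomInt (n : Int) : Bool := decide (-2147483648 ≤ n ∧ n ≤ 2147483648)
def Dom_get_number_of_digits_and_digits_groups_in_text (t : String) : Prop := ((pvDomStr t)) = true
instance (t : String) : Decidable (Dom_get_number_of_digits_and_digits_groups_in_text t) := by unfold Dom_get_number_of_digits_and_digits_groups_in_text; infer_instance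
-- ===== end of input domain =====

-- B replaces A's char-by-char accumulator loop with a two-pointer maximal-run scanner
-- (each digit group is sliced out at once; the digit count is the sum of group lengths).


-- ===== PORT A =====
-- state: (groups, n_digits, group); group kept as List Char, appended as a String
def pvAStep (st : List String × Int × List Char) (c : Char) :
    List String × Int × List Char :=
  if PySem.Chars.isdigit c then (st.1, st.2.1 + 1, st.2.2 ++ [c])
  else if st.2.2.length ≠ 0 then (st.1 ++ [String.ofList st.2.2], st.2.1, [])
  else st

def get_number_of_digits_and_digits_groups_in_text (t : String) : Int × List String :=
  let st := t.toList.foldl pvAStep ([], 0, [])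
  let groups := if st.2.2.length ≠ 0 then st.1 ++ [String.ofList st.2.2] else st.1
  (st.2.1, groups)

-- ===== PORT B =====
-- inner while loop of B: split off the maximal digit prefix and the rest
def pvSpan : List Char → List Char × List Char
  | [] => ([], [])
  | c :: cs => if PySem.Chars.isdigit c then
      let p := pvSpan cs; (c :: p.1, p.2)
    else ([], c :: cs)

theorem pvSpan_snd_le (l : List Char) : (pvSpan l).2.length ≤ l.length := by
  induction l with
  | nil => simp [pvSpan]
  | cons c cs ih =>
    simp only [pvSpan]
    split
    · exact Nat.le_succ_of_le ih
    · simp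

-- outer while loop of B: the maximal digit runs
def pvRuns : List Char → List (List Char)
  | [] => []
  | c :: cs =>
    if PySem.Chars.isdigit c then
      (c :: (pvSpan cs).1) :: pvRuns (pvSpan cs).2
    else pvRuns cs
termination_by l => l.length
decreasing_by
  · exact Nat.lt_succ_of_le (pvSpan_snd_le cs)
  · simp

def get_number_of_digits_and_digits_groups_in_text_alt (t : String) : Int × List String :=
  let gs := pvRuns t.toList
  (gs.foldl (fun a g => a + (g.length : Int)) 0, gs.map String.ofList)

-- ===== PRECONDITION & SPEC =====
def Spec_get_number_of_digits_and_digits_groups_in_text (t : String) (out : Int × List String) : Prop := out = get_number_of_digits_and_digits_groups_in_text_alt t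
instance (t : String) (out : Int × List String) : Decidable (Spec_get_number_of_digits_and_digits_groups_in_text t out) := by unfold Spec_get_number_of_digits_and_digits_groups_in_text; infer_instance

-- ===== CLAIM (what is proved, stated in full; the proofs are below) =====
def Claim_equal_get_number_of_digits_and_digits_groups_in_text : Prop := ∀ (t : String), Dom_get_number_of_digits_and_digits_groups_in_text t → Spec_get_number_of_digits_and_digits_groups_in_text t (get_number_of_digits_and_digits_groups_in_text t)

-- ===== LEMMAS AND PROOFS =====

theorem pvSpan_eq (l : List Char) :
    pvSpan l = (l.takeWhile PySem.Chars.isdigit, l.dropWhile PySem.Chars.isdigit) := by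
  induction l with
  | nil => simp [pvSpan]
  | cons c cs ih =>
    simp only [pvSpan, List.takeWhile, List.dropWhile]
    by_cases h : PySem.Chars.isdigit c <;> simp [h, ih]

-- A's fold with a carried partial group, characterised via runs of the remaining list
def pvRunsC (g : List Char) : List Char → List (List Char)
  | [] => if g = [] then [] else [g]
  | c :: cs =>
    if PySem.Chars.isdigit c then pvRunsC (g ++ [c]) cs
    else (if g = [] then [] else [g]) ++ pvRunsC [] cs

-- carried-run characterisation of the nonempty-carry case
theorem pvRunsC_ne (l : List Char) : ∀ g : List Char, g ≠ [] →
    pvRunsC g l = (g ++ l.takeWhile PySem.Chars.isdigit) :: pvRunsC [] (l.dropWhile PySem.Chars.isdigit) := by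
  induction l with
  | nil => intro g hg; simp [pvRunsC, hg]
  | cons c cs ih =>
    intro g hg
    by_cases h : PySem.Chars.isdigit c
    · simp only [pvRunsC, h, if_pos, List.takeWhile, List.dropWhile]
      rw [ih (g ++ [c]) (by simp)]
      simp
    · simp [pvRunsC, h, hg, List.takeWhile, List.dropWhile]

theorem pvRunsC_nil_eq (l : List Char) : pvRunsC [] l = pvRuns l := by
  induction l using pvRuns.induct with
  | case1 => simp [pvRunsC, pvRuns]
  | case2 c cs h ih =>
    rw [pvRunsC, if_pos h]
    simp only [List.nil_append]
    rw [pvRunsC_ne cs [c] (by simp), pvRuns, if_pos h, pvSpan_eq]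
    rw [pvSpan_eq] at ih
    simp [ih]
  | case3 c cs h ih =>
    rw [pvRunsC, if_neg h, pvRuns, if_neg h]
    simp [ih]

-- the fold of A, with the pending group flushed, equals the carried runs
theorem pvA_fold (l : List Char) : ∀ (gs : List String) (n : Int) (g : List Char),
    (let st := l.foldl pvAStep (gs, n, g)
     ((if st.2.2.length ≠ 0 then st.1 ++ [String.ofList st.2.2] else st.1), st.2.1)) =
    (gs ++ (pvRunsC g l).map String.ofList, n + (l.countP PySem.Chars.isdigit : Int)) := by
  induction l with
  | nil =>
    intro gs n g
    by_cases hg : g = [] <;> simp [pvRunsC, hg, List.countP]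
  | cons c cs ih =>
    intro gs n g
    rw [List.foldl_cons]
    by_cases h : PySem.Chars.isdigit c
    · have hstep : pvAStep (gs, n, g) c = (gs, n + 1, g ++ [c]) := by simp [pvAStep, h]
      rw [hstep, ih gs (n + 1) (g ++ [c]), List.countP_cons_of_pos h]
      simp only [pvRunsC, h, if_pos, Prod.mk.injEq]
      exact ⟨trivial, by push_cast; ring⟩
    · by_cases hg : g = []
      · have hstep : pvAStep (gs, n, g) c = (gs, n, g) := by simp [pvAStep, h, hg]
        rw [hstep, ih gs n g, List.countP_cons_of_neg (by simpa using h)]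
        simp [pvRunsC, h, hg]
      · have hlen : g.length ≠ 0 := by simpa using hg
        have hstep : pvAStep (gs, n, g) c = (gs ++ [String.ofList g], n, []) := by
          simp [pvAStep, h, hlen]
        rw [hstep, ih (gs ++ [String.ofList g]) n [],
          List.countP_cons_of_neg (by simpa using h)]
        simp [pvRunsC, h, hg]

-- B's Int sum of group lengths
theorem pvSum_lengths (gs : List (List Char)) (a : Int) :
    gs.foldl (fun a g => a + (g.length : Int)) a = a + ((gs.map List.length).sum : Int) := by
  induction gs generalizing a with
  | nil => simp
  | cons g gs ih => simp [ih]; ring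

theorem pvRuns_length_sum (l : List Char) :
    ((pvRuns l).map List.length).sum = l.countP PySem.Chars.isdigit := by
  induction l using pvRuns.induct with
  | case1 => simp [pvRuns]
  | case2 c cs h ih =>
    rw [pvRuns, if_pos h, pvSpan_eq] at *
    simp only [List.map_cons, List.sum_cons, ih]
    have hsplit : cs.countP PySem.Chars.isdigit =
        (cs.takeWhile PySem.Chars.isdigit).countP PySem.Chars.isdigit +
        (cs.dropWhile PySem.Chars.isdigit).countP PySem.Chars.isdigit := by
      conv_lhs => rw [← List.takeWhile_append_dropWhile (p := PySem.Chars.isdigit) (l := cs)]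
      rw [List.countP_append]
    have htake : (cs.takeWhile PySem.Chars.isdigit).countP PySem.Chars.isdigit =
        (cs.takeWhile PySem.Chars.isdigit).length := by
      rw [List.countP_eq_length]
      intro a ha; exact List.mem_takeWhile_imp ha
    rw [List.countP_cons_of_pos h, hsplit, htake]
    simp at ih ⊢
    omega
  | case3 c cs h ih =>
    rw [pvRuns, if_neg h, ih, List.countP_cons_of_neg (by simpa using h)]

-- ===== VERDICT (by name: the statement is the Claim_ definition above) =====
theorem get_number_of_digits_and_digits_groups_in_text_spec : Claim_equal_get_number_of_digits_and_digits_groups_in_text := by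
  intro t _
  show _ = _
  unfold get_number_of_digits_and_digits_groups_in_text get_number_of_digits_and_digits_groups_in_text_alt
  have h := pvA_fold t.toList [] 0 []
  simp only [List.nil_append, Int.zero_add] at h
  have h1 := congrArg Prod.fst h
  have h2 := congrArg Prod.snd h
  simp only at h1 h2
  rw [Prod.ext_iff]
  constructor
  · simp only [h2, pvSum_lengths, pvRuns_length_sum]
    simp
  · simp only [h1, pvRunsC_nil_eq]
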